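-- pv_equiv track=rewrite | github.com/brittytino/wad-lab | backend/bin/AppData/Perflogs/ProgramData/System Volume Information/ds1/05-Stack and Queue/range_count_stack.py | range_count
-- ===== SOURCE A (Python) =====
-- def range_count(stack, a):
--     count = 0
--     temp = []
--     while stack:
--         val = stack.pop()
--         if val >= a:
--             count += 1
--         temp.append(val)
--     # restore stack
--     while temp:
--         stack.append(temp.pop())
--     return count
-- ===== SOURCE B (Python) =====
-- def range_count(stack, a):
--     return sum(1 for val in stack if val >= a)
-- ===== Notes on version B (the rewrite author's own statement) =====
-- stated objective: simpler
-- what changed: Replaced the pop-into-temp / count / restore-loop structure with a single non-mutating pass that sums 1 for each element >= a, dropping the temp buffer and the restore loop entirely.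
import Mathlib
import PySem

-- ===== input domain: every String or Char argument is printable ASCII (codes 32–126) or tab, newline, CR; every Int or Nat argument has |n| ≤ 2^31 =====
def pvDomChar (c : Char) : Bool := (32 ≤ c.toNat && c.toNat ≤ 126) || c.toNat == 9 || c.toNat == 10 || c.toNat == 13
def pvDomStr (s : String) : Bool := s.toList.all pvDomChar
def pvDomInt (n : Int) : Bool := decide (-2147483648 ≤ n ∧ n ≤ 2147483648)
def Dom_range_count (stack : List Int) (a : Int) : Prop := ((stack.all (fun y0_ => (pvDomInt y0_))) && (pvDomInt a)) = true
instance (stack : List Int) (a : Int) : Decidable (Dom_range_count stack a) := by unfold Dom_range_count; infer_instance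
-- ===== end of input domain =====

-- B replaces A's pop/count/restore loops with one non-mutating counting pass (simpler).
-- A mutates `stack` but restores it before returning, so the caller sees the same list;
-- the equivalence proved here is about the return value.

-- ===== PORT A =====
-- A's first while-loop pops from the end of `stack`; we transliterate it as a
-- recursion over stack.reverse carrying A's (count, temp) state.
def rcPopLoop (a : Int) : List Int → Int → List Int → Int × List Int
  | [], count, temp => (count, temp)
  | val :: rest, count, temp =>
      rcPopLoop a rest (if val ≥ a then count + 1 else count) (temp ++ [val])

-- A's second while-loop only rebuilds `stack` from temp; it does not affect the
-- returned count, so the port returns the first component of the loop state.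
def range_count (stack : List Int) (a : Int) : Int :=
  (rcPopLoop a stack.reverse 0 []).1

-- ===== PORT B =====
def range_count_alt (stack : List Int) (a : Int) : Int :=
  stack.foldl (fun c val => if val ≥ a then c + 1 else c) 0

-- ===== PRECONDITION & SPEC =====
def Spec_range_count (stack : List Int) (a : Int) (out : Int) : Prop := out = range_count_alt stack a
instance (stack : List Int) (a : Int) (out : Int) : Decidable (Spec_range_count stack a out) := by unfold Spec_range_count; infer_instance

-- ===== CLAIM (what is proved, stated in full; the proofs are below) =====
def Claim_equal_range_count : Prop := ∀ (stack : List Int) (a : Int), Dom_range_count stack a → Spec_range_count stack a (range_count stack a)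

-- ===== LEMMAS AND PROOFS =====
theorem rcPopLoop_fst (a : Int) (l : List Int) (c : Int) (t : List Int) :
    (rcPopLoop a l c t).1 = c + ((l.filter (fun v => v ≥ a)).length : Int) := by
  induction l generalizing c t with
  | nil => simp [rcPopLoop]
  | cons v rest ih =>
      simp only [rcPopLoop, ih, List.filter_cons]
      by_cases h : v ≥ a <;> simp [h] <;> omega

theorem foldl_count (a : Int) (l : List Int) (c : Int) :
    l.foldl (fun c val => if val ≥ a then c + 1 else c) c
      = c + ((l.filter (fun v => v ≥ a)).length : Int) := by
  induction l generalizing c with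
  | nil => simp
  | cons v rest ih =>
      simp only [List.foldl_cons, ih, List.filter_cons]
      by_cases h : v ≥ a <;> simp [h] <;> omega

-- ===== VERDICT (by name: the statement is the Claim_ definition above) =====
theorem range_count_spec : Claim_equal_range_count := by
  intro stack a _
  unfold Spec_range_count range_count range_count_alt
  rw [rcPopLoop_fst, foldl_count, List.filter_reverse, List.length_reverse]
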